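-- pv_equiv track=rewrite | github.com/Meghan13/SENG-310-Project | sortingStuff.py | remove_null
-- ===== SOURCE A (Python) =====
-- def remove_null(list):
--     num = 0
--     null_pos = []
--     # loop through and find the position of all nulls
--     for index in range(0, len(list)):
--         if list[index] is None:
--             num += 1
--             null_pos.append(index)
--     # flip order to not create problems with pop()
--     null_pos.reverse()
--     # remove all the nulls
--     for index in range(0, len(null_pos)):
--         list.pop(null_pos[index])
--     return num
-- ===== SOURCE B (Python) =====
-- def remove_null(list):
--     # single-pass in-place compaction with a write index; same mutation
--     # (removes the None entries from the same list object) and same return value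
--     w = 0
--     for x in list:
--         if x is not None:
--             list[w] = x
--             w += 1
--     removed = len(list) - w
--     del list[w:]
--     return removed
-- ===== Notes on version B (the rewrite author's own statement) =====
-- stated objective: simpler
-- what changed: Replaced the two-pass collect-null-indices-then-pop-each scheme (each pop is an O(n) shift) with a single forward scan that compacts non-None elements via a write index and truncates the tail once.
import Mathlib
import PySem

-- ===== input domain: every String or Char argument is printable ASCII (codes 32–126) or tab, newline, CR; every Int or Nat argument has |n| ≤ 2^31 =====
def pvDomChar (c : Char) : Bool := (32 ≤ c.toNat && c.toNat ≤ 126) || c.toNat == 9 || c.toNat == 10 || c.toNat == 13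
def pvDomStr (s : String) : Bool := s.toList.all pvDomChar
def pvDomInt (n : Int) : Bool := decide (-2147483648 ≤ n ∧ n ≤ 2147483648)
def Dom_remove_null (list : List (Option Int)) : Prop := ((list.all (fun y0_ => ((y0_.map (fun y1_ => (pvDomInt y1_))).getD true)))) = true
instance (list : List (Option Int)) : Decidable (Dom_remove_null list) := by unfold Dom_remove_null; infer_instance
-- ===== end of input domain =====

-- B replaces collect-null-indices-then-pop-each with a one-pass write-index compaction (simpler);
-- both mutate the argument list the same way in Python; the theorem is about the return value.

-- ===== PORT A =====
def remove_null (list : List (Option Int)) : Int :=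
  -- first loop: for index in range(0, len(list)): if list[index] is None: num += 1; null_pos.append(index)
  let st := (PySem.List.pyRange 0 (list.length : Int) 1).foldl
    (fun (p : Int × List Int) index =>
      if PySem.List.pyGetD list index (some 0) = none then (p.1 + 1, p.2 ++ [index]) else p)
    (0, [])
  let num := st.1
  let null_pos := st.2.reverse   -- null_pos.reverse()
  -- second loop: for index in range(0, len(null_pos)): list.pop(null_pos[index])  (mutation; result unused for the return value)
  let _final := (PySem.List.pyRange 0 (null_pos.length : Int) 1).foldl
    (fun (l : List (Option Int)) index =>
      ((PySem.List.pop? l (PySem.List.pyGetD null_pos index (-1))).map Prod.snd).getD l) list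
  num

-- ===== PORT B =====
def remove_null_alt (list : List (Option Int)) : Int :=
  -- w = 0; for x in list: if x is not None: list[w] = x; w += 1
  let st := list.foldl
    (fun (p : List (Option Int) × Int) x =>
      if x ≠ none then (p.1.set p.2.toNat x, p.2 + 1) else p)
    (list, 0)
  let w := st.2
  let removed : Int := (list.length : Int) - w
  let _final := st.1.take w.toNat   -- del list[w:]  (mutation; unused for the return value)
  removed

-- ===== PRECONDITION & SPEC =====
def Spec_remove_null (list : List (Option Int)) (out : Int) : Prop := out = remove_null_alt list
instance (list : List (Option Int)) (out : Int) : Decidable (Spec_remove_null list out) := by unfold Spec_remove_null; infer_instance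

-- ===== CLAIM (what is proved, stated in full; the proofs are below) =====
def Claim_equal_remove_null : Prop := ∀ (list : List (Option Int)), Dom_remove_null list → Spec_remove_null list (remove_null list)

-- ===== LEMMAS AND PROOFS =====

-- A's counting loop: the running count gains one per None in the unscanned suffix of l.
theorem remove_null_loopA (l : List (Option Int)) :
    ∀ (k : Nat) (a num : Int) (pos : List Int), a = (l.length : Int) - k → (k : Int) ≤ l.length →
    ((PySem.List.pyRange a (l.length : Int) 1).foldl
      (fun (p : Int × List Int) index =>
        if PySem.List.pyGetD l index (some 0) = none then (p.1 + 1, p.2 ++ [index]) else p)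
      (num, pos)).1
    = num + ((l.drop a.toNat).countP (fun x => x == none) : Int) := by
  intro k
  induction k with
  | zero =>
      intro a num pos ha hk
      have : a = (l.length : Int) := by omega
      subst this
      rw [PySem.List.pyRange_one_eq_nil (le_refl _)]
      simp
  | succ n ih =>
      intro a num pos ha hk
      have ha0 : 0 ≤ a := by omega
      have halt : a < (l.length : Int) := by omega
      have hnat : a.toNat < l.length := by omega
      rw [PySem.List.pyRange_one_cons halt]
      simp only [List.foldl_cons]
      rw [PySem.List.pyGetD_of_nonneg l (some 0) ha0, List.getD_eq_getElem l (some 0) hnat]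
      have hdrop : l.drop a.toNat = l[a.toNat] :: l.drop (a.toNat + 1) :=
        List.drop_eq_getElem_cons hnat
      have hsucc : (a + 1).toNat = a.toNat + 1 := by omega
      by_cases hx : l[a.toNat] = none
      · rw [if_pos hx, ih (a+1) (num+1) (pos ++ [a]) (by omega) (by omega), hsucc]
        simp [hdrop, hx]
        omega
      · rw [if_neg hx, ih (a+1) num pos (by omega) (by omega), hsucc, hdrop, List.countP_cons]
        have hb : (l[a.toNat] == none) = false := by simp [Option.isSome_iff_ne_none, hx]
        rw [hb]
        simp

-- B's compaction loop: the write index gains one per non-None element scanned.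
theorem remove_null_loopB (l : List (Option Int)) :
    ∀ (buf : List (Option Int)) (w : Int),
    ((l.foldl (fun (p : List (Option Int) × Int) x =>
        if x ≠ none then (p.1.set p.2.toNat x, p.2 + 1) else p) (buf, w)).2)
    = w + (l.countP (fun x => !(x == none)) : Int) := by
  induction l with
  | nil => intro buf w; simp
  | cons x xs ih =>
      intro buf w
      by_cases hx : x = none
      · rw [List.foldl_cons, if_neg (by simp [hx]), ih buf w, List.countP_cons]
        have hb : (!(x == none)) = false := by simp [hx]
        rw [hb]
        simp
      · rw [List.foldl_cons, if_pos hx, ih (buf.set w.toNat x) (w + 1), List.countP_cons]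
        have hb : (!(x == none)) = true := by simp [Option.isSome_iff_ne_none, hx]
        rw [hb]
        norm_num
        ring

theorem remove_null_count (l : List (Option Int)) :
    (l.countP (fun x => x == none) : Int) = (l.length : Int) - (l.countP (fun x => !(x == none)) : Int) := by
  have h := l.length_eq_countP_add_countP (fun x => x == none)
  have h2 : l.countP (fun x => !(x == none)) = l.countP (fun x => ¬ (x == none) = true) :=
    List.countP_congr (fun x _ => by simp [Option.isSome_iff_ne_none, Ne])
  omega

-- ===== VERDICT (by name: the statement is the Claim_ definition above) =====
theorem remove_null_spec : Claim_equal_remove_null := by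
  intro list _
  unfold Spec_remove_null remove_null remove_null_alt
  simp only []
  rw [remove_null_loopA list list.length 0 0 [] (by omega) (by omega),
      remove_null_loopB list list 0]
  have hd : List.drop (Int.toNat 0) list = list := by simp
  rw [hd]
  have h := remove_null_count list
  omega
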